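-- pv_equiv track=rewrite | github.com/yanghara/BaiTapLonCPMN | app/utils.py | count_thuoc
-- ===== SOURCE A (Python) =====
-- def count_thuoc(thuoc):
--     total_amount, total_quantity = 0, 0
--
--     if thuoc:
--         for c in thuoc.values():
--             total_quantity += c['quantity']
--             total_amount += c['quantity'] + 1
--
--     return {
--         "total_amount": total_amount,
--         "total_quantity": total_quantity
--     }
-- ===== SOURCE B (Python) =====
-- def count_thuoc(thuoc):
--     def go(items):
--         # recursion over the list of item dicts, combining results back-to-front
--         if not items:
--             return (0, 0)
--         amt, qty = go(items[1:])
--         q = items[0]['quantity']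
--         return (amt + q + 1, qty + q)
--
--     amt, qty = go(list(thuoc.values()) if thuoc else [])
--     return {
--         "total_amount": amt,
--         "total_quantity": qty
--     }
-- ===== Notes on version B (the rewrite author's own statement) =====
-- stated objective: alternative
-- what changed: Replaces A's iterative loop with two mutable accumulators by a structural recursion over the list of item dicts that returns an (amount, quantity) pair and combines each head with the recursive result back-to-front.
import Mathlib
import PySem

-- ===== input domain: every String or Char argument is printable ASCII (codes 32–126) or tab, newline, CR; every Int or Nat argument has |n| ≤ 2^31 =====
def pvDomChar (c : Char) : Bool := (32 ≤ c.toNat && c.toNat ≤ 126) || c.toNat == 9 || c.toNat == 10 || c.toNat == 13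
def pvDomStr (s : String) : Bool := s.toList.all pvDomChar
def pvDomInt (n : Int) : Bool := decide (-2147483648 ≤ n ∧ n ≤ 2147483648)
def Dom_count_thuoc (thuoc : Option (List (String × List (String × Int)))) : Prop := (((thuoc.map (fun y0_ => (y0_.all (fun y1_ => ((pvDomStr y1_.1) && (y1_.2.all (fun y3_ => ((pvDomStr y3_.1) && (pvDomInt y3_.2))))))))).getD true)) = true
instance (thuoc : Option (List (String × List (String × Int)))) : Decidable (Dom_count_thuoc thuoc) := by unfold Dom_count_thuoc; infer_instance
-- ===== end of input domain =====

-- B replaces A's iterative two-accumulator loop with a structural recursion over the item dicts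
-- that combines an (amount, quantity) pair back-to-front (objective: alternative).

-- ===== PORT A =====
-- first-match lookup of key "quantity"; Pre_ guarantees the key is present, where Python would raise KeyError
def pvQty (d : List (String × Int)) : Int :=
  ((d.find? (fun kv => kv.1 == "quantity")).map Prod.snd).getD 0

def count_thuoc (thuoc : Option (List (String × List (String × Int)))) : List (String × Int) :=
  let s :=
    match thuoc with
    | none => ((0 : Int), (0 : Int))
    | some l =>
      if l = [] then ((0 : Int), (0 : Int))
      else l.foldl (fun (s : Int × Int) (kv : String × List (String × Int)) => (s.1 + pvQty kv.2 + 1, s.2 + pvQty kv.2)) ((0 : Int), (0 : Int))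
  [("total_amount", s.1), ("total_quantity", s.2)]

-- ===== PORT B =====
-- recursive helper 'go' from Source B: combines head with recursive result on the tail
def pvGoB : List (List (String × Int)) → Int × Int
  | [] => ((0 : Int), (0 : Int))
  | c :: rest =>
    let r := pvGoB rest
    (r.1 + pvQty c + 1, r.2 + pvQty c)

def count_thuoc_alt (thuoc : Option (List (String × List (String × Int)))) : List (String × Int) :=
  let items : List (List (String × Int)) :=
    match thuoc with
    | none => []
    | some l => if l = [] then [] else l.map Prod.snd
  let r := pvGoB items
  [("total_amount", r.1), ("total_quantity", r.2)]

-- ===== PRECONDITION & SPEC =====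
-- Pre_ excludes inputs where some inner dict lacks the key "quantity": there Python A raises KeyError.
def Pre_count_thuoc (thuoc : Option (List (String × List (String × Int)))) : Prop :=
  ∀ l, thuoc = some l → ∀ kv ∈ l, "quantity" ∈ kv.2.map Prod.fst
instance (thuoc : Option (List (String × List (String × Int)))) : Decidable (Pre_count_thuoc thuoc) := by unfold Pre_count_thuoc; infer_instance
def pvWitness_count_thuoc : (Option (List (String × List (String × Int)))) :=
  some [("a", [("quantity", 2)]), ("b", [("quantity", 5)])]
def Spec_count_thuoc (thuoc : Option (List (String × List (String × Int)))) (out : List (String × Int)) : Prop := out = count_thuoc_alt thuoc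
instance (thuoc : Option (List (String × List (String × Int)))) (out : List (String × Int)) : Decidable (Spec_count_thuoc thuoc out) := by unfold Spec_count_thuoc; infer_instance

-- ===== CLAIM (what is proved, stated in full; the proofs are below) =====
def Claim_equal_count_thuoc : Prop := ∀ (thuoc : Option (List (String × List (String × Int)))), Dom_count_thuoc thuoc → Pre_count_thuoc thuoc → Spec_count_thuoc thuoc (count_thuoc thuoc)

-- ===== LEMMAS AND PROOFS =====
theorem pvGoB_map (l : List (String × List (String × Int))) :
    pvGoB (l.map Prod.snd)
      = ((l.map (fun kv => pvQty kv.2)).sum + l.length, (l.map (fun kv => pvQty kv.2)).sum) := by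
  induction l with
  | nil => simp [pvGoB]
  | cons h t ih =>
    simp only [List.map_cons, pvGoB, ih, List.sum_cons, List.length_cons]
    refine Prod.ext ?_ ?_ <;> push_cast <;> ring

theorem pv_foldl_pair (l : List (String × List (String × Int))) (a b : Int) :
    l.foldl (fun (s : Int × Int) (kv : String × List (String × Int)) => (s.1 + pvQty kv.2 + 1, s.2 + pvQty kv.2)) (a, b)
      = (a + (l.map (fun kv => pvQty kv.2)).sum + l.length, b + (l.map (fun kv => pvQty kv.2)).sum) := by
  induction l generalizing a b with
  | nil => simp
  | cons h t ih =>
    simp only [List.foldl_cons, List.map_cons, List.sum_cons, List.length_cons, ih]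
    refine Prod.ext ?_ ?_ <;> push_cast <;> ring

-- ===== VERDICT (by name: the statement is the Claim_ definition above) =====
theorem count_thuoc_spec : Claim_equal_count_thuoc := by
  intro thuoc _ _
  unfold Spec_count_thuoc count_thuoc count_thuoc_alt
  cases thuoc with
  | none => rfl
  | some l =>
    by_cases hl : l = []
    · simp [hl, pvGoB]
    · simp only [if_neg hl, pv_foldl_pair, pvGoB_map]
      simp
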